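-- pv_equiv track=rewrite | github.com/risingsunomi/dllm | src/dllm/model.py | _preferred_weight_index_name
-- ===== SOURCE A (Python) =====
-- def _preferred_weight_index_name(repo_files: list[str]) -> str | None:
--     preferred = "model.safetensors.index.json"
--     if preferred in repo_files:
--         return preferred
--     candidates = [name for name in repo_files if name.endswith(".safetensors.index.json")]
--     if not candidates:
--         return None
--     return sorted(candidates, key=lambda name: ("/" in name, name))[0]
-- ===== SOURCE B (Python) =====
-- def _preferred_weight_index_name(repo_files: list[str]) -> str | None:
--     preferred = "model.safetensors.index.json"
--     has_preferred = False
--     best = None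
--     for name in repo_files:
--         if name == preferred:
--             has_preferred = True
--         if name.endswith(".safetensors.index.json"):
--             if best is None or ("/" in name, name) < ("/" in best, best):
--                 best = name
--     return preferred if has_preferred else best
-- ===== Notes on version B (the rewrite author's own statement) =====
-- stated objective: alternative
-- what changed: Replaces the membership test + comprehension + sort-and-take-head with one fused pass that tracks a preferred-name flag and a running strict-minimum candidate under the same (has-slash, name) key.
import Mathlib
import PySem

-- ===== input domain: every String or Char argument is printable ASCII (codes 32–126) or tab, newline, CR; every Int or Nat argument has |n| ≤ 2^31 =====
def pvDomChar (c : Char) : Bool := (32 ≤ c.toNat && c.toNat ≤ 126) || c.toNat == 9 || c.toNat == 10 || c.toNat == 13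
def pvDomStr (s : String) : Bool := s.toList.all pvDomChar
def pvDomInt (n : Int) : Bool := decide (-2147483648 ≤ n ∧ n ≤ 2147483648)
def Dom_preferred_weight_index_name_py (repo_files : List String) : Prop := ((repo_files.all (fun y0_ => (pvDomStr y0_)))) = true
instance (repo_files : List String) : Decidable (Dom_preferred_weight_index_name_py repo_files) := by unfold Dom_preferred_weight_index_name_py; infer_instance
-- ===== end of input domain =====

-- B fuses A's membership test, comprehension and sort-then-take-head into one pass keeping a flag and a running minimum (alternative decomposition; return value only).


-- ===== PORT A =====
def preferred_weight_index_name_py (repo_files : List String) : Option String :=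
  let preferred := "model.safetensors.index.json"
  if preferred ∈ repo_files then some preferred
  else
    let candidates := repo_files.filter (fun name => PySem.Str.endswith name ".safetensors.index.json")
    if candidates.isEmpty then none
    else (PySem.List.sorted2 candidates (fun name => PySem.Str.isIn "/" name) (fun name => name) false).head?

-- ===== PORT B =====
def preferred_weight_index_name_py_alt (repo_files : List String) : Option String :=
  let preferred := "model.safetensors.index.json"
  let st := repo_files.foldl (fun (st : Bool × Option String) name =>
    let hasPref := st.1 || (name == preferred)
    let best :=
      if PySem.Str.endswith name ".safetensors.index.json" then
        match st.2 with
        | none => some name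
        | some b =>
          if decide (PySem.Str.isIn "/" name < PySem.Str.isIn "/" b) ||
             ((PySem.Str.isIn "/" name == PySem.Str.isIn "/" b) && decide (name < b))
          then some name else some b
      else st.2
    (hasPref, best)) (false, none)
  if st.1 then some preferred else st.2

-- ===== PRECONDITION & SPEC =====
def Spec_preferred_weight_index_name_py (repo_files : List String) (out : Option String) : Prop := out = preferred_weight_index_name_py_alt repo_files
instance (repo_files : List String) (out : Option String) : Decidable (Spec_preferred_weight_index_name_py repo_files out) := by unfold Spec_preferred_weight_index_name_py; infer_instance

-- ===== CLAIM (what is proved, stated in full; the proofs are below) =====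
def Claim_equal_preferred_weight_index_name_py : Prop := ∀ (repo_files : List String), Dom_preferred_weight_index_name_py repo_files → Spec_preferred_weight_index_name_py repo_files (preferred_weight_index_name_py repo_files)

-- ===== LEMMAS AND PROOFS =====

-- head of an insertion sort = running first-wins strict minimum, for any comparator
theorem head_foldl_insertBy {α : Type} (lt : α → α → Bool) (xs : List α) (acc : List α) :
    (xs.foldl (fun acc x => PySem.List.insertBy lt x acc) acc).head? =
    xs.foldl (fun st x => match st with
      | none => some x
      | some m => if lt x m then some x else some m) acc.head? := by
  induction xs generalizing acc with
  | nil => rfl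
  | cons x xs ih =>
    simp only [List.foldl_cons]
    rw [ih]
    congr 1
    cases acc with
    | nil => rfl
    | cons y ys =>
      simp only [PySem.List.insertBy, List.head?_cons]
      by_cases h : lt x y <;> simp [h]

-- B's fused fold = (membership flag, running minimum over the filtered list)
theorem b_fold_split (fs : List String) (b : Bool) (o : Option String) :
    fs.foldl (fun (st : Bool × Option String) name =>
      (st.1 || (name == "model.safetensors.index.json"),
        if PySem.Str.endswith name ".safetensors.index.json" then
          match st.2 with
          | none => some name
          | some m =>
            if decide (PySem.Str.isIn "/" name < PySem.Str.isIn "/" m) ||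
               ((PySem.Str.isIn "/" name == PySem.Str.isIn "/" m) && decide (name < m))
            then some name else some m
        else st.2)) (b, o) =
    (b || fs.any (fun n => n == "model.safetensors.index.json"),
     (fs.filter (fun n => PySem.Str.endswith n ".safetensors.index.json")).foldl
       (fun st name => match st with
         | none => some name
         | some m =>
           if decide (PySem.Str.isIn "/" name < PySem.Str.isIn "/" m) ||
              ((PySem.Str.isIn "/" name == PySem.Str.isIn "/" m) && decide (name < m))
           then some name else some m) o) := by
  induction fs generalizing b o with
  | nil => simp
  | cons x fs ih =>
    simp only [List.foldl_cons, List.any_cons, List.filter_cons]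
    by_cases h : PySem.Str.endswith x ".safetensors.index.json" = true
    · rw [if_pos h, if_pos h, ih, List.foldl_cons, Bool.or_assoc]
    · rw [if_neg h, if_neg h, ih, Bool.or_assoc]

-- B's lexicographic test equals sorted2's fused comparator
theorem cmp_eq (name m : String) :
    (decide (PySem.Str.isIn "/" name < PySem.Str.isIn "/" m) ||
       ((PySem.Str.isIn "/" name == PySem.Str.isIn "/" m) && decide (name < m))) =
    (decide (PySem.Str.isIn "/" name < PySem.Str.isIn "/" m) ||
       (!decide (PySem.Str.isIn "/" m < PySem.Str.isIn "/" name) && decide (name < m))) := by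
  cases h1 : PySem.Str.isIn "/" name <;> cases h2 : PySem.Str.isIn "/" m <;> simp

-- ===== VERDICT (by name: the statement is the Claim_ definition above) =====
theorem preferred_weight_index_name_py_spec : Claim_equal_preferred_weight_index_name_py := by
  intro fs _
  unfold Spec_preferred_weight_index_name_py preferred_weight_index_name_py preferred_weight_index_name_py_alt
  simp only []
  rw [b_fold_split]
  by_cases hmem : "model.safetensors.index.json" ∈ fs
  · simp [hmem, List.any_eq_true]
  · simp only [hmem, if_false, Bool.false_or]
    have hany : fs.any (fun n => n == "model.safetensors.index.json") = false := by
      simp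
      intro x hx; intro h; exact hmem (h ▸ hx)
    rw [hany]
    simp only [if_false, Bool.false_eq_true]
    set cand := fs.filter (fun n => PySem.Str.endswith n ".safetensors.index.json") with hcand
    by_cases hc : cand.isEmpty
    · have : cand = [] := List.isEmpty_iff.mp hc
      simp [this]
    · simp only [hc, if_false]
      unfold PySem.List.sorted2
      simp only [if_neg (by decide : ¬ (false = true))]
      rw [head_foldl_insertBy]
      simp only [List.head?_nil]
      congr 1
      funext st name
      cases st with
      | none => rfl
      | some m => simp only [cmp_eq]
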